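-- pv_equiv track=rewrite | github.com/HBinhCT/Q-project | hackerrank/Algorithms/Prime XOR/solution.py | primeXor
-- ===== SOURCE A (Python) =====
-- def primeXor(a):
--     from collections import defaultdict
--
--     def is_prime(num):
--         if num <= 1:
--             return False
--         if num <= 3:
--             return True
--         if num % 2 == 0 or num % 3 == 0:
--             return False
--         i = 5
--         while i * i <= num:
--             if num % i == 0 or num % (i + 2) == 0:
--                 return False
--             i += 6
--         return True
--
--     max_bits = 8192
--     mod = 1000000007
--     values = defaultdict(int)
--     for i in a:
--         values[i] += 1
--     res = [[0] * max_bits for _ in range(len(values) + 1)]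
--     res[0][0] = 1  # empty set
--     i = 1
--     for x, nx in values.items():
--         nx_even = nx // 2 + 1  # includes empty set
--         nx_odd = (nx + 1) // 2
--         for j in range(max_bits):
--             # Can create bit pattern j from either
--             # - The multisets with bit pattern j formed from arr[:i-1] + an even number of items with value x
--             # _ Appending an odd number of items with value x to the multisets with bit pattern k such that k^x
--             # has pattern j
--             res[i][j] = (res[i - 1][j] * nx_even + res[i - 1][j ^ x] * nx_odd) % mod
--         i += 1
--     return sum(res[-1][x] for x in range(2, max_bits) if is_prime(x)) % mod
-- ===== SOURCE B (Python) =====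
-- def primeXor(a):
--     from collections import Counter
--
--     MOD = 1000000007
--     N = 8192  # 2**13
--     INV_N = 883911139  # modular inverse of 8192 mod MOD
--
--     def is_prime(num):
--         if num <= 1:
--             return False
--         if num <= 3:
--             return True
--         if num % 2 == 0 or num % 3 == 0:
--             return False
--         i = 5
--         while i * i <= num:
--             if num % i == 0 or num % (i + 2) == 0:
--                 return False
--             i += 6
--         return True
--
--     counts = Counter(a)
--     # Walsh-Hadamard transform of the multiset-count vector, built factor by factor:
--     # the distinct value x with multiplicity nx contributes, at transform point w,
--     # the factor e + o*(-1)^popcount(w & x) where e counts even and o odd choices of x.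
--     t = [1] * N
--     for x, nx in counts.items():
--         e = nx // 2 + 1
--         o = (nx + 1) // 2
--         y = x % N
--         t = [v * (e + o if (w & y).bit_count() % 2 == 0 else e - o) % MOD
--              for w, v in enumerate(t)]
--
--     # inverse transform: recursive Hadamard butterfly, then division by N mod MOD
--     def iwht(v):
--         m = len(v)
--         if m == 1:
--             return v
--         half = m // 2
--         lo = iwht(v[:half])
--         hi = iwht(v[half:])
--         return ([(lo[i] + hi[i]) % MOD for i in range(half)]
--                 + [(lo[i] - hi[i]) % MOD for i in range(half)])
--
--     vec = [v * INV_N % MOD for v in iwht(t)]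
--     return sum(vec[j] for j in range(2, N) if is_prime(j)) % MOD
-- ===== Notes on version B (the rewrite author's own statement) =====
-- stated objective: alternative
-- what changed: B replaces A's incremental 8192-state xor DP with a Walsh-Hadamard (xor-convolution) approach: it multiplies each distinct value's closed-form transform factor pointwise over the 8192 transform points, applies a recursive inverse Hadamard butterfly with the modular inverse of 8192, and sums the recovered counts at prime patterns.
import Mathlib
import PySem

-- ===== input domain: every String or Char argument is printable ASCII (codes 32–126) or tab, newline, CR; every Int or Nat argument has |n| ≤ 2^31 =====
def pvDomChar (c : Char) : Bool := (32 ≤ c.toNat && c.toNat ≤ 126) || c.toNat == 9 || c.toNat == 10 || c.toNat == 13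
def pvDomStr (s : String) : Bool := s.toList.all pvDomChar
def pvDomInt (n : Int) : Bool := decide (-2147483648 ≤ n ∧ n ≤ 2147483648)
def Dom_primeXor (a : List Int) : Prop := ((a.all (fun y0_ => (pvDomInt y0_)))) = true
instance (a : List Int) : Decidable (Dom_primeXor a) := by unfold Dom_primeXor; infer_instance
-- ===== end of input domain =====

-- B replaces A's incremental xor DP by a Walsh–Hadamard (xor-convolution) computation:
-- pointwise product of per-value transform factors, then a recursive inverse butterfly.

-- ===== PORT A =====
-- the 'while i * i <= num: ... i += 6' loop of A's is_prime; the Nat argument is fuel that only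
-- makes the recursion structural — num.toNat steps are more than the loop can ever take
def pvIsPrimeLoopA (num : Int) : Nat → Int → Bool
  | 0, _ => true
  | fuel + 1, i =>
    if i * i ≤ num then
      (if PySem.Int.mod num i == 0 || PySem.Int.mod num (i + 2) == 0 then false
       else pvIsPrimeLoopA num fuel (i + 6))
    else true

def pvIsPrimeA (num : Int) : Bool :=
  if num ≤ 1 then false
  else if num ≤ 3 then true
  else if PySem.Int.mod num 2 == 0 || PySem.Int.mod num 3 == 0 then false
  else pvIsPrimeLoopA num num.toNat 5

-- the inner 'for j in range(max_bits)' loop building row i from row i-1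
def pvRowA (prev : List Int) (x nx : Int) : List Int :=
  let nxEven := PySem.Int.floordiv nx 2 + 1
  let nxOdd := PySem.Int.floordiv (nx + 1) 2
  (PySem.List.pyRange 0 8192).map (fun j =>
    PySem.Int.mod (PySem.List.pyGetD prev j 0 * nxEven
      + PySem.List.pyGetD prev (PySem.Int.bxor j x) 0 * nxOdd) 1000000007)

-- A writes each row of 'res' exactly once, in order; the table is ported as the list of written rows
def primeXor (a : List Int) : Int :=
  let values := a.foldl (fun d i => d.modify i 0 (· + 1)) PySem.Dict.empty
  let row0 : List Int := PySem.List.pySetD (List.replicate 8192 (0 : Int)) 0 1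
  let res := values.items.foldl
    (fun (res : List (List Int)) p => res ++ [pvRowA (PySem.List.pyGetD res (-1) []) p.1 p.2]) [row0]
  PySem.Int.mod ((PySem.List.pyRange 2 8192).foldl
    (fun s x => if pvIsPrimeA x then s + PySem.List.pyGetD (PySem.List.pyGetD res (-1) []) x 0 else s)
    0) 1000000007

-- ===== PORT B =====
-- B's is_prime is the same helper as A's (fuel as above)
def pvIsPrimeLoopB (num : Int) : Nat → Int → Bool
  | 0, _ => true
  | fuel + 1, i =>
    if i * i ≤ num then
      (if PySem.Int.mod num i == 0 || PySem.Int.mod num (i + 2) == 0 then false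
       else pvIsPrimeLoopB num fuel (i + 6))
    else true

def pvIsPrimeB (num : Int) : Bool :=
  if num ≤ 1 then false
  else if num ≤ 3 then true
  else if PySem.Int.mod num 2 == 0 || PySem.Int.mod num 3 == 0 then false
  else pvIsPrimeLoopB num num.toNat 5

-- the comprehension multiplying one value's transform factor into t;
-- '(w & y).bit_count()' is PySem.Int.bitCount (PySem.Int.band …), both Python-exact
def pvStepT (t : List Int) (x nx : Int) : List Int :=
  let e := PySem.Int.floordiv nx 2 + 1
  let o := PySem.Int.floordiv (nx + 1) 2
  let y := PySem.Int.mod x 8192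
  (PySem.List.enumerate t).map (fun wv =>
    PySem.Int.mod (wv.2 * (if PySem.Int.bitCount (PySem.Int.band wv.1 y) % 2 == 0
      then e + o else e - o)) 1000000007)

-- Source B's recursive inverse Hadamard butterfly; Source B tests 'm == 1', the '≤ 1' guard only makes
-- the recursion total on the unreachable empty list
def pvIwht (v : List Int) : List Int :=
  if _h : v.length ≤ 1 then v
  else
    let half : Int := PySem.Int.floordiv (v.length : Int) 2
    let lo := pvIwht (PySem.List.slice v none (some half))
    let hi := pvIwht (PySem.List.slice v (some half) none)
    (PySem.List.pyRange 0 half).map (fun i =>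
        PySem.Int.mod (PySem.List.pyGetD lo i 0 + PySem.List.pyGetD hi i 0) 1000000007) ++
    (PySem.List.pyRange 0 half).map (fun i =>
        PySem.Int.mod (PySem.List.pyGetD lo i 0 - PySem.List.pyGetD hi i 0) 1000000007)
termination_by v.length
decreasing_by
  · rw [show PySem.Int.floordiv (v.length : Int) 2 = ((v.length / 2 : Nat) : Int) from
      PySem.Int.floordiv_natCast v.length 2, PySem.List.slice_to_natCast]
    simp only [List.length_take]
    omega
  · rw [show PySem.Int.floordiv (v.length : Int) 2 = ((v.length / 2 : Nat) : Int) from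
      PySem.Int.floordiv_natCast v.length 2, PySem.List.slice_from_natCast]
    simp only [List.length_drop]
    omega

def primeXor_alt (a : List Int) : Int :=
  let counts := PySem.Dict.counter a
  let t : List Int := counts.items.foldl (fun t p => pvStepT t p.1 p.2) (List.replicate 8192 1)
  let vec := (pvIwht t).map (fun v => PySem.Int.mod (v * 883911139) 1000000007)
  PySem.Int.mod (((PySem.List.pyRange 2 8192).filter (fun j => pvIsPrimeB j)).map
    (fun j => PySem.List.pyGetD vec j 0)).sum 1000000007

-- ===== PRECONDITION & SPEC =====
-- Pre_ excludes exactly the inputs on which A raises IndexError: an element ≥ 8192 makes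
-- 'res[i-1][j ^ x]' index past the end of an 8192-row, an element < -8192 below its start.
def Pre_primeXor (a : List Int) : Prop := ∀ x ∈ a, -8192 ≤ x ∧ x < 8192
instance (a : List Int) : Decidable (Pre_primeXor a) := by unfold Pre_primeXor; infer_instance

def pvWitness_primeXor : List Int := [3, 4, 5, 5]

def Spec_primeXor (a : List Int) (out : Int) : Prop := out = primeXor_alt a
instance (a : List Int) (out : Int) : Decidable (Spec_primeXor a out) := by unfold Spec_primeXor; infer_instance

-- ===== CLAIM (what is proved, stated in full; the proofs are below) =====
def Claim_equal_primeXor : Prop := ∀ (a : List Int), Dom_primeXor a → Pre_primeXor a → Spec_primeXor a (primeXor a)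

-- ===== LEMMAS AND PROOFS =====

lemma pvLoopEq : ∀ (fuel : Nat) (num i : Int), pvIsPrimeLoopB num fuel i = pvIsPrimeLoopA num fuel i := by
  intro fuel
  induction fuel with
  | zero => intro num i; rfl
  | succ n ih => intro num i; simp [pvIsPrimeLoopA, pvIsPrimeLoopB, ih]

lemma pvPrimeAgree (x : Int) : pvIsPrimeA x = pvIsPrimeB x := by
  simp [pvIsPrimeA, pvIsPrimeB, pvLoopEq]

-- xor against the all-ones mask 2^n - 1 is subtraction from it
lemma pvCompXor : ∀ (n : Nat), ∀ (t : Nat), t < 2 ^ n → (2 ^ n - 1) ^^^ t = 2 ^ n - 1 - t := by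
  intro n
  induction n with
  | zero => intro t ht; interval_cases t; rfl
  | succ n ih =>
    intro t ht
    have hp : 0 < 2 ^ n := by positivity
    have hd : ((2 ^ (n + 1) - 1) ^^^ t) / 2 = 2 ^ n - 1 - t / 2 := by
      rw [Nat.xor_div_two]
      have he : (2 ^ (n + 1) - 1) / 2 = 2 ^ n - 1 := by omega
      rw [he]
      exact ih (t / 2) (by omega)
    have hm : ((2 ^ (n + 1) - 1) ^^^ t) % 2 = 1 - t % 2 := by
      have hx := Nat.xor_mod_two_pow (a := 2 ^ (n + 1) - 1) (b := t) (n := 1)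
      have h1 : (2 : Nat) ^ 1 = 2 := by norm_num
      rw [h1] at hx
      have ho : (2 ^ (n + 1) - 1) % 2 = 1 := by omega
      rw [hx, ho]
      rcases Nat.mod_two_eq_zero_or_one t with h | h <;> rw [h] <;> rfl
    omega

lemma pvSubXor (t : Nat) (h : t < 8192) : 8191 - t = 8191 ^^^ t := by
  have := pvCompXor 13 t (by norm_num; omega)
  norm_num at this
  omega

-- Python's wrapped read row[j ^ x] is the read at the value reduced mod 8192
lemma pvGetWrap (row : List Int) (hlen : row.length = 8192) (j x : Int)
    (hj0 : 0 ≤ j) (hj : j < 8192) (hx1 : -8192 ≤ x) (hx2 : x < 8192) :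
    PySem.List.pyGetD row (PySem.Int.bxor j x) 0
      = PySem.List.pyGetD row (PySem.Int.bxor j (PySem.Int.mod x 8192)) 0 := by
  by_cases hx0 : 0 ≤ x
  · have h : PySem.Int.mod x 8192 = x := by
      rw [PySem.Int.mod_eq_emod_of_pos (by norm_num)]
      exact Int.emod_eq_of_lt hx0 hx2
    rw [h]
  · have hmod : PySem.Int.mod x 8192 = x + 8192 := by
      rw [PySem.Int.mod_eq_emod_of_pos (by norm_num)]; omega
    set m : Nat := j.toNat with hm
    have hjm : j = (m : Int) := by omega
    have hmlt : m < 8192 := by omega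
    set k : Nat := (-x - 1).toNat with hk
    have hxk : x = -(k : Int) - 1 := by omega
    have hklt : k < 8192 := by omega
    have h13 : (8192 : Nat) = 2 ^ 13 := by norm_num
    have hu : m ^^^ k < 8192 := by
      rw [h13]; exact Nat.xor_lt_two_pow (by omega) (by omega)
    have hbx : PySem.Int.bxor j x = -(((m ^^^ k) + 1 : Nat) : Int) := by
      rw [hjm, hxk]
      unfold PySem.Int.bxor
      rw [if_pos (by positivity), if_neg (by omega)]
      have h1 : ((m : Int)).toNat = m := by omega
      have h2 : (-(-(k : Int) - 1) - 1).toNat = k := by omega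
      rw [h1, h2]
      push_cast
      ring
    have hby : PySem.Int.bxor j (PySem.Int.mod x 8192) = ((m ^^^ (8191 - k) : Nat) : Int) := by
      have h3 : PySem.Int.mod x 8192 = ((8191 - k : Nat) : Int) := by
        rw [hmod, hxk]; omega
      rw [hjm, h3, PySem.Int.bxor_natCast]
    have hv : m ^^^ (8191 - k) < 8192 := by
      rw [h13]; exact Nat.xor_lt_two_pow (by omega) (by omega)
    rw [hbx, hby]
    rw [PySem.List.pyGetD_neg_natCast row ((m ^^^ k) + 1) 0 (by omega) (by omega)]
    rw [PySem.List.pyGetD_natCast]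
    rw [List.getD_eq_getElem row 0 (by omega : m ^^^ (8191 - k) < row.length)]
    congr 1
    have hidx : row.length - ((m ^^^ k) + 1) = 8191 - (m ^^^ k) := by omega
    rw [hidx, pvSubXor (m ^^^ k) hu, pvSubXor k hklt]
    rw [Nat.xor_comm 8191 (m ^^^ k), Nat.xor_assoc, Nat.xor_comm k 8191]

-- the last row of A's appended table is the fold of the row maker
lemma pvLastFold (items : List (Int × Int)) : ∀ (pre : List (List Int)) (r : List Int),
    PySem.List.pyGetD (items.foldl
      (fun res p => res ++ [pvRowA (PySem.List.pyGetD res (-1) []) p.1 p.2]) (pre ++ [r])) (-1) []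
      = items.foldl (fun row p => pvRowA row p.1 p.2) r := by
  induction items with
  | nil => intro pre r; simp [PySem.List.pyGetD_neg_one_append_singleton]
  | cons p ps ih =>
    intro pre r
    simp only [List.foldl_cons]
    rw [PySem.List.pyGetD_neg_one_append_singleton]
    exact ih (pre ++ [r]) (pvRowA r p.1 p.2)

lemma pvRow0 : PySem.List.pySetD (List.replicate 8192 (0 : Int)) 0 1
    = (PySem.List.pyRange 0 8192).map (fun j => if j = 0 then (1 : Int) else 0) := by
  rw [PySem.List.pySetD_of_nonneg _ _ (by norm_num)]
  apply List.ext_getElem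
  · simp only [List.length_set, List.length_replicate, List.length_map,
      PySem.List.length_pyRange_one]
    omega
  · intro i h1 h2
    simp only [List.getElem_set, List.getElem_replicate, List.getElem_map,
      PySem.List.getElem_pyRange_one]
    split_ifs <;> omega


def pvNbc (n : Nat) : Nat := PySem.Int.bitCount (n : Int)

lemma pvNbc_zero : pvNbc 0 = 0 := by decide

lemma pvNbc_step (m : Nat) (h : 0 < m) : pvNbc m = m % 2 + pvNbc (m / 2) :=
  PySem.Int.bitCount_natCast h

lemma pvXorMod2 (a b : Nat) : (a ^^^ b) % 2 = (a % 2 + b % 2) % 2 := by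
  have h : (a ^^^ b) % 2 = (a + b) % 2 := by norm_num
  omega

lemma pvNbc_xor : ∀ a : Nat, ∀ b : Nat, pvNbc (a ^^^ b) % 2 = (pvNbc a + pvNbc b) % 2 := by
  intro a
  induction a using Nat.strong_induction_on with
  | _ a ih =>
    intro b
    rcases Nat.eq_zero_or_pos a with ha | ha
    · subst ha; simp [pvNbc_zero]
    rcases Nat.eq_zero_or_pos b with hb | hb
    · subst hb; simp [pvNbc_zero]
    rcases Nat.eq_zero_or_pos (a ^^^ b) with hx | hx
    · have hab : a = b := by
        have := Nat.xor_eq_zero_iff.mp hx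
        exact this
      subst hab
      rw [hx, pvNbc_zero]
      omega
    have h1 := pvNbc_step a ha
    have h2 := pvNbc_step b hb
    have h3 := pvNbc_step (a ^^^ b) hx
    rw [Nat.xor_div_two] at h3
    have h4 := ih (a / 2) (by omega) (b / 2)
    have h5 := pvXorMod2 a b
    omega

lemma pvNbc_two_pow : ∀ n : Nat, pvNbc (2 ^ n) = 1 := by
  intro n
  induction n with
  | zero => decide
  | succ m ih =>
    have h := pvNbc_step (2 ^ (m + 1)) (by positivity)
    have h1 : 2 ^ (m + 1) % 2 = 0 := by
      have : (2:Nat) ∣ 2 ^ (m+1) := dvd_pow_self 2 (by omega)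
      omega
    have h2 : 2 ^ (m + 1) / 2 = 2 ^ m := by
      rw [pow_succ]; omega
    rw [h, h1, h2, ih]

lemma pvAddXor : ∀ n : Nat, ∀ w : Nat, w < 2 ^ n → 2 ^ n + w = 2 ^ n ^^^ w := by
  intro n
  induction n with
  | zero => intro w hw; interval_cases w; rfl
  | succ m ih =>
    intro w hw
    have hd : (2 ^ (m + 1) ^^^ w) / 2 = 2 ^ m + w / 2 := by
      rw [Nat.xor_div_two]
      have : 2 ^ (m + 1) / 2 = 2 ^ m := by rw [pow_succ]; omega
      rw [this]
      exact (ih (w / 2) (by omega)).symm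
    have hm2 : (2 ^ (m + 1) ^^^ w) % 2 = w % 2 := by
      have := pvXorMod2 (2 ^ (m + 1)) w
      have h1 : 2 ^ (m + 1) % 2 = 0 := by
        have : (2:Nat) ∣ 2 ^ (m+1) := dvd_pow_self 2 (by omega)
        omega
      omega
    have h1 : 2 ^ (m + 1) % 2 = 0 := by
      have : (2:Nat) ∣ 2 ^ (m+1) := dvd_pow_self 2 (by omega)
      omega
    omega

lemma pvLandLow (n j : Nat) (hj : j < 2 ^ n) : j &&& 2 ^ n = 0 := by
  rw [Nat.and_two_pow j n, Nat.testBit_lt_two_pow hj]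
  simp

def pvSgn (j w : Nat) : ZMod 1000000007 := if pvNbc (j &&& w) % 2 = 0 then 1 else -1

lemma pvSgn_zero_left (w : Nat) : pvSgn 0 w = 1 := by
  simp [pvSgn, Nat.zero_and, pvNbc_zero]

lemma pvSgn_comm (j w : Nat) : pvSgn j w = pvSgn w j := by
  simp [pvSgn, Nat.and_comm]

lemma pvSgn_xor_left (a b w : Nat) : pvSgn (a ^^^ b) w = pvSgn a w * pvSgn b w := by
  unfold pvSgn
  rw [Nat.and_xor_distrib_right]
  have h := pvNbc_xor (a &&& w) (b &&& w)
  split_ifs with h1 h2 h3 h4 h5 h6 h7 <;> first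
    | (exfalso; omega)
    | norm_num

lemma pvSgn_low_high (n j w : Nat) (hj : j < 2 ^ n) (hw : w < 2 ^ n) :
    pvSgn j (2 ^ n + w) = pvSgn j w := by
  rw [pvAddXor n w hw]
  unfold pvSgn
  rw [Nat.and_xor_distrib_left, pvLandLow n j hj, Nat.zero_xor]

lemma pvSgn_high_low (n j w : Nat) (hj : j < 2 ^ n) (hw : w < 2 ^ n) :
    pvSgn (2 ^ n + j) w = pvSgn j w := by
  rw [pvSgn_comm, pvSgn_low_high n w j hw hj, pvSgn_comm]

lemma pvSgn_high_high (n j w : Nat) (hj : j < 2 ^ n) (hw : w < 2 ^ n) :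
    pvSgn (2 ^ n + j) (2 ^ n + w) = - pvSgn j w := by
  rw [pvAddXor n j hj, pvAddXor n w hw]
  unfold pvSgn
  rw [Nat.and_xor_distrib_left, Nat.and_xor_distrib_right, Nat.and_xor_distrib_right]
  rw [Nat.and_self]
  rw [Nat.and_comm (2 ^ n) w, pvLandLow n j hj, pvLandLow n w hw]
  rw [Nat.xor_zero, Nat.zero_xor]
  have hx : pvNbc (2 ^ n ^^^ j &&& w) % 2 = (1 + pvNbc (j &&& w)) % 2 := by
    have := pvNbc_xor (2 ^ n) (j &&& w)
    rw [pvNbc_two_pow n] at this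
    exact this
  split_ifs with h1 h2 h3 <;> first | (exfalso; omega) | norm_num

lemma pvSumRangeAdd (f : Nat → ZMod 1000000007) (m n : Nat) :
    ∑ i ∈ Finset.range (m + n), f i
      = (∑ i ∈ Finset.range m, f i) + ∑ i ∈ Finset.range n, f (m + i) := by
  rw [Finset.range_eq_Ico,
    ← Finset.sum_Ico_consecutive f (Nat.zero_le m) (Nat.le_add_right m n), ← Finset.range_eq_Ico]
  congr 1
  rw [Finset.sum_Ico_eq_sum_range]
  have h : m + n - m = n := by omega
  rw [h]

lemma pvSumXor (n y : Nat) (hy : y < 2 ^ n) (g : Nat → ZMod 1000000007) :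
    ∑ j ∈ Finset.range (2 ^ n), g (j ^^^ y) = ∑ j ∈ Finset.range (2 ^ n), g j := by
  apply Finset.sum_nbij' (fun j => j ^^^ y) (fun j => j ^^^ y)
  · intro a ha
    rw [Finset.mem_range] at ha ⊢
    exact Nat.xor_lt_two_pow ha hy
  · intro a ha
    rw [Finset.mem_range] at ha ⊢
    exact Nat.xor_lt_two_pow ha hy
  · intro a _; simp
  · intro a _; simp
  · intro a _; rfl

lemma pvOrth : ∀ n : Nat, ∀ u : Nat, u < 2 ^ n →
    (∑ w ∈ Finset.range (2 ^ n), pvSgn u w)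
      = if u = 0 then ((2 ^ n : Nat) : ZMod 1000000007) else 0 := by
  intro n
  induction n with
  | zero =>
    intro u hu
    interval_cases u
    simp [pvSgn_zero_left]
  | succ m ih =>
    intro u hu
    have hsplit : (2 : Nat) ^ (m + 1) = 2 ^ m + 2 ^ m := by rw [pow_succ]; omega
    rw [hsplit, pvSumRangeAdd]
    by_cases hlow : u < 2 ^ m
    · have h1 : ∀ w ∈ Finset.range (2 ^ m), pvSgn u (2 ^ m + w) = pvSgn u w := by
        intro w hw
        exact pvSgn_low_high m u w hlow (Finset.mem_range.mp hw)
      rw [Finset.sum_congr rfl h1, ih u hlow]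
      split_ifs
      · push_cast; ring
      · ring
    · obtain ⟨u', rfl⟩ : ∃ u', u = 2 ^ m + u' := ⟨u - 2 ^ m, by omega⟩
      have hu' : u' < 2 ^ m := by omega
      have h1 : ∀ w ∈ Finset.range (2 ^ m), pvSgn (2 ^ m + u') w = pvSgn u' w := by
        intro w hw
        exact pvSgn_high_low m u' w hu' (Finset.mem_range.mp hw)
      have h2 : ∀ w ∈ Finset.range (2 ^ m), pvSgn (2 ^ m + u') (2 ^ m + w) = - pvSgn u' w := by
        intro w hw
        exact pvSgn_high_high m u' w hu' (Finset.mem_range.mp hw)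
      rw [Finset.sum_congr rfl h1, Finset.sum_congr rfl h2]
      have hne : 2 ^ m + u' ≠ 0 := by positivity
      rw [if_neg hne]
      rw [Finset.sum_neg_distrib]
      ring

def pvF0 : Nat → ZMod 1000000007 := fun j => if j = 0 then 1 else 0

def pvStepZ (x nx : Int) (f : Nat → ZMod 1000000007) : Nat → ZMod 1000000007 := fun j =>
  f j * ((PySem.Int.floordiv nx 2 + 1 : Int) : ZMod 1000000007)
    + f (j ^^^ (PySem.Int.mod x 8192).toNat) * ((PySem.Int.floordiv (nx + 1) 2 : Int) : ZMod 1000000007)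

def pvVF (items : List (Int × Int)) : Nat → ZMod 1000000007 :=
  items.foldl (fun f p => pvStepZ p.1 p.2 f) pvF0

def pvFac (x nx : Int) (w : Nat) : ZMod 1000000007 :=
  ((PySem.Int.floordiv nx 2 + 1 : Int) : ZMod 1000000007)
    + ((PySem.Int.floordiv (nx + 1) 2 : Int) : ZMod 1000000007) * pvSgn (PySem.Int.mod x 8192).toNat w

def pvWZ (n : Nat) (f : Nat → ZMod 1000000007) (w : Nat) : ZMod 1000000007 :=
  ∑ j ∈ Finset.range (2 ^ n), pvSgn j w * f j

lemma pvModToNatLt (x : Int) : (PySem.Int.mod x 8192).toNat < 8192 := by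
  have h1 := PySem.Int.mod_nonneg x (by norm_num : (0:Int) < 8192)
  have h2 := PySem.Int.mod_lt x (by norm_num : (0:Int) < 8192)
  omega

lemma pvDiag (n : Nat) (x nx : Int) (hy : (PySem.Int.mod x 8192).toNat < 2 ^ n)
    (f : Nat → ZMod 1000000007) (w : Nat) :
    pvWZ n (pvStepZ x nx f) w = pvWZ n f w * pvFac x nx w := by
  set y : Nat := (PySem.Int.mod x 8192).toNat with hy'
  set e : ZMod 1000000007 := ((PySem.Int.floordiv nx 2 + 1 : Int) : ZMod 1000000007) with he
  set o : ZMod 1000000007 := ((PySem.Int.floordiv (nx + 1) 2 : Int) : ZMod 1000000007) with ho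
  unfold pvWZ pvStepZ pvFac
  have hsplit : (∑ j ∈ Finset.range (2 ^ n), pvSgn j w * (f j * e + f (j ^^^ y) * o))
      = ∑ j ∈ Finset.range (2 ^ n), (pvSgn j w * f j * e + pvSgn j w * f (j ^^^ y) * o) :=
    Finset.sum_congr rfl (fun j _ => by ring)
  rw [hsplit, Finset.sum_add_distrib, ← Finset.sum_mul, ← Finset.sum_mul]
  have hre : (∑ j ∈ Finset.range (2 ^ n), pvSgn j w * f (j ^^^ y))
      = pvSgn y w * ∑ j ∈ Finset.range (2 ^ n), pvSgn j w * f j := by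
    have h1 : (∑ j ∈ Finset.range (2 ^ n), pvSgn j w * f (j ^^^ y))
        = ∑ j ∈ Finset.range (2 ^ n), pvSgn (j ^^^ y) w * f j := by
      rw [← pvSumXor n y hy (fun j => pvSgn (j ^^^ y) w * f j)]
      apply Finset.sum_congr rfl
      intro j _
      rw [Nat.xor_xor_cancel_right]
    rw [h1, Finset.mul_sum]
    apply Finset.sum_congr rfl
    intro j _
    rw [pvSgn_xor_left]
    ring
  rw [hre]
  ring

lemma pvWZF0 (n : Nat) (w : Nat) : pvWZ n pvF0 w = 1 := by
  unfold pvWZ pvF0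
  rw [Finset.sum_eq_single 0]
  · simp [pvSgn_zero_left]
  · intro b _ hb
    simp [hb]
  · intro h
    exfalso
    exact h (Finset.mem_range.mpr (by positivity))

lemma pvWZFold (n : Nat) (items : List (Int × Int)) : ∀ (f : Nat → ZMod 1000000007) (w : Nat),
    (∀ p ∈ items, (PySem.Int.mod p.1 8192).toNat < 2 ^ n) →
    pvWZ n (items.foldl (fun f p => pvStepZ p.1 p.2 f) f) w
      = items.foldl (fun acc p => acc * pvFac p.1 p.2 w) (pvWZ n f w) := by
  induction items with
  | nil => intro f w _; simp only [List.foldl_nil]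
  | cons p ps ih =>
    intro f w hb
    simp only [List.foldl_cons]
    rw [ih (pvStepZ p.1 p.2 f) w (fun q hq => hb q (by simp [hq])),
      pvDiag n p.1 p.2 (hb p (by simp)) f w]

lemma pvDouble (n : Nat) (items : List (Int × Int))
    (hb : ∀ p ∈ items, (PySem.Int.mod p.1 8192).toNat < 2 ^ n) (j : Nat) (hj : j < 2 ^ n) :
    (∑ w ∈ Finset.range (2 ^ n), pvSgn j w
        * (items.foldl (fun acc p => acc * pvFac p.1 p.2 w) 1))
      = ((2 ^ n : Nat) : ZMod 1000000007) * pvVF items j := by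
  have hG : ∀ w : Nat, items.foldl (fun acc p => acc * pvFac p.1 p.2 w) 1
      = pvWZ n (pvVF items) w := by
    intro w
    rw [pvVF, pvWZFold n items pvF0 w hb, pvWZF0]
  rw [Finset.sum_congr rfl (fun w _ => by rw [hG w])]
  unfold pvWZ pvVF
  have h1 : ∀ w : Nat, pvSgn j w * ∑ k ∈ Finset.range (2 ^ n),
        pvSgn k w * (List.foldl (fun f p => pvStepZ p.1 p.2 f) pvF0 items) k
      = ∑ k ∈ Finset.range (2 ^ n),
        pvSgn (j ^^^ k) w * (List.foldl (fun f p => pvStepZ p.1 p.2 f) pvF0 items) k := by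
    intro w
    rw [Finset.mul_sum]
    exact Finset.sum_congr rfl (fun k _ => by rw [pvSgn_xor_left]; ring)
  rw [Finset.sum_congr rfl (fun w _ => h1 w), Finset.sum_comm]
  have h2 : ∀ k ∈ Finset.range (2 ^ n), (∑ w ∈ Finset.range (2 ^ n),
        pvSgn (j ^^^ k) w * (List.foldl (fun f p => pvStepZ p.1 p.2 f) pvF0 items) k)
      = (if j ^^^ k = 0 then ((2 ^ n : Nat) : ZMod 1000000007) else 0)
        * (List.foldl (fun f p => pvStepZ p.1 p.2 f) pvF0 items) k := by
    intro k hk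
    rw [← Finset.sum_mul, pvOrth n (j ^^^ k) (Nat.xor_lt_two_pow hj (Finset.mem_range.mp hk))]
  rw [Finset.sum_congr rfl h2, Finset.sum_eq_single j]
  · simp
  · intro k _ hk
    have hne : j ^^^ k ≠ 0 := fun h => hk (Nat.xor_eq_zero_iff.mp h).symm
    simp [hne]
  · intro h
    exact absurd (Finset.mem_range.mpr hj) h

lemma pvCastMod (a : Int) :
    ((PySem.Int.mod a 1000000007 : Int) : ZMod 1000000007) = (a : ZMod 1000000007) := by
  rw [PySem.Int.mod_eq_emod_of_pos (by norm_num : (0:Int) < 1000000007)]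
  have h : ((1000000007 : Int)) = ((1000000007 : Nat) : Int) := by norm_num
  rw [h, ZMod.intCast_mod a 1000000007]

lemma pvIntEq (a b : Int) (ha0 : 0 ≤ a) (ha1 : a < 1000000007) (hb0 : 0 ≤ b) (hb1 : b < 1000000007)
    (h : (a : ZMod 1000000007) = (b : ZMod 1000000007)) : a = b := by
  have hd : ((1000000007 : Nat) : Int) ∣ b - a := by
    have := (ZMod.intCast_eq_intCast_iff a b 1000000007).mp h
    exact Int.ModEq.dvd this
  have : (1000000007 : Int) ∣ b - a := by exact_mod_cast hd
  omega

lemma pvTakeGetD (v : List Int) (h w : Nat) (hw : w < h) (hh : h ≤ v.length) :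
    (v.take h).getD w 0 = v.getD w 0 := by
  rw [List.getD_eq_getElem _ _ (by simp; omega), List.getD_eq_getElem _ _ (by omega)]
  exact List.getElem_take

lemma pvDropGetD (v : List Int) (h w : Nat) (hw : h + w < v.length) :
    (v.drop h).getD w 0 = v.getD (h + w) 0 := by
  rw [List.getD_eq_getElem _ _ (by simp; omega), List.getD_eq_getElem _ _ (by omega)]
  exact List.getElem_drop ..

-- ---- A-side invariant ----

def pvGoodA (v : List Int) (f : Nat → ZMod 1000000007) : Prop :=
  v.length = 8192 ∧ ∀ j : Nat, j < 8192 →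
    0 ≤ v.getD j 0 ∧ v.getD j 0 < 1000000007 ∧ ((v.getD j 0 : Int) : ZMod 1000000007) = f j

lemma pvStepAGood (v : List Int) (f : Nat → ZMod 1000000007) (x nx : Int)
    (hg : pvGoodA v f) (hx1 : -8192 ≤ x) (hx2 : x < 8192) :
    pvGoodA (pvRowA v x nx) (pvStepZ x nx f) := by
  obtain ⟨hlen, hent⟩ := hg
  constructor
  · simp only [pvRowA, List.length_map, PySem.List.length_pyRange_one]
    decide
  · intro j hj
    have hj' : ((j : Int)) < 8192 := by exact_mod_cast hj
    have hentry : (pvRowA v x nx).getD j 0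
        = PySem.Int.mod (PySem.List.pyGetD v (j : Int) 0 * (PySem.Int.floordiv nx 2 + 1)
            + PySem.List.pyGetD v (PySem.Int.bxor (j : Int) x) 0 * PySem.Int.floordiv (nx + 1) 2)
            1000000007 := by
      rw [← PySem.List.pyGetD_natCast]
      simp only [pvRowA]
      rw [PySem.List.pyGetD_map_pyRange_of_nonneg _ 8192 (j : Int) 0 (Int.natCast_nonneg j) hj']
    rw [hentry]
    refine ⟨PySem.Int.mod_nonneg _ (by norm_num), PySem.Int.mod_lt _ (by norm_num), ?_⟩
    rw [pvGetWrap v hlen (j : Int) x (Int.natCast_nonneg j) hj' hx1 hx2]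
    set yn : Nat := (PySem.Int.mod x 8192).toNat with hyn
    have hymod : PySem.Int.mod x 8192 = (yn : Int) :=
      (Int.toNat_of_nonneg (PySem.Int.mod_nonneg x (by norm_num))).symm
    have hynlt : yn < 8192 := pvModToNatLt x
    rw [hymod, PySem.Int.bxor_natCast, PySem.List.pyGetD_natCast, PySem.List.pyGetD_natCast]
    have hxlt : j ^^^ yn < 8192 := by
      have : (8192 : Nat) = 2 ^ 13 := by norm_num
      rw [this] at hj hynlt ⊢
      exact Nat.xor_lt_two_pow hj hynlt
    rw [pvCastMod]
    push_cast
    rw [(hent j hj).2.2, (hent (j ^^^ yn) hxlt).2.2]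
    simp only [pvStepZ]
    push_cast
    ring

lemma pvRow0Good : pvGoodA (PySem.List.pySetD (List.replicate 8192 (0 : Int)) 0 1) pvF0 := by
  rw [pvRow0]
  constructor
  · simp only [List.length_map, PySem.List.length_pyRange_one]
    decide
  · intro j hj
    have hj' : ((j : Int)) < 8192 := by exact_mod_cast hj
    have hentry : ((PySem.List.pyRange 0 8192).map (fun i => if i = 0 then (1:Int) else 0)).getD j 0
        = if (j : Int) = 0 then (1:Int) else 0 := by
      rw [← PySem.List.pyGetD_natCast]
      rw [PySem.List.pyGetD_map_pyRange_of_nonneg _ 8192 (j : Int) 0 (Int.natCast_nonneg j) hj']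
    rw [hentry]
    simp only [pvF0, Int.natCast_eq_zero]
    split_ifs <;> norm_num

-- ---- B-side t invariant ----

def pvGoodT (t : List Int) (g : Nat → ZMod 1000000007) : Prop :=
  t.length = 8192 ∧ ∀ w : Nat, w < 8192 → ((t.getD w 0 : Int) : ZMod 1000000007) = g w

lemma pvEnumMapGetD (f : Int × Int → Int) : ∀ (t : List Int) (s : Int) (w : Nat), w < t.length →
    ((PySem.List.enumerate t s).map f).getD w 0 = f (s + w, t.getD w 0) := by
  intro t
  induction t with
  | nil => intro s w hw; simp at hw
  | cons a t ih =>
    intro s w hw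
    rw [PySem.List.enumerate_cons]
    cases w with
    | zero => simp
    | succ w' =>
      simp only [List.map_cons, List.getD_cons_succ, List.length_cons] at *
      rw [ih (s + 1) w' (by omega)]
      have harg : s + 1 + (w' : Int) = s + ((w' + 1 : Nat) : Int) := by push_cast; ring
      rw [harg]

lemma pvStepTGood (t : List Int) (g : Nat → ZMod 1000000007) (x nx : Int) (hg : pvGoodT t g) :
    pvGoodT (pvStepT t x nx) (fun w => g w * pvFac x nx w) := by
  obtain ⟨hlen, hent⟩ := hg
  constructor
  · simp only [pvStepT, List.length_map, PySem.List.length_enumerate, hlen]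
  · intro w hw
    set yn : Nat := (PySem.Int.mod x 8192).toNat with hyn
    have hymod : PySem.Int.mod x 8192 = (yn : Int) :=
      (Int.toNat_of_nonneg (PySem.Int.mod_nonneg x (by norm_num))).symm
    have hentry : (pvStepT t x nx).getD w 0
        = PySem.Int.mod (t.getD w 0 * (if PySem.Int.bitCount (PySem.Int.band ((0:Int) + (w:Int)) (PySem.Int.mod x 8192)) % 2 == 0
            then PySem.Int.floordiv nx 2 + 1 + PySem.Int.floordiv (nx + 1) 2
            else PySem.Int.floordiv nx 2 + 1 - PySem.Int.floordiv (nx + 1) 2)) 1000000007 := by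
      simp only [pvStepT]
      rw [pvEnumMapGetD _ t 0 w (by omega)]
    rw [hentry, hymod]
    have hband : PySem.Int.band ((0:Int) + (w:Int)) ((yn : Nat) : Int) = ((w &&& yn : Nat) : Int) := by
      rw [zero_add, PySem.Int.band_natCast]
    rw [hband]
    have hbc : PySem.Int.bitCount ((w &&& yn : Nat) : Int) = pvNbc (w &&& yn) := rfl
    rw [hbc]
    by_cases hpar : pvNbc (w &&& yn) % 2 = 0
    · rw [if_pos (by simpa using hpar)]
      rw [pvCastMod]
      push_cast
      rw [hent w hw]
      simp only [pvFac, pvSgn, ← hyn, Nat.and_comm yn w]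
      rw [if_pos hpar]
      push_cast
      ring
    · rw [if_neg (by simpa using hpar)]
      rw [pvCastMod]
      push_cast
      rw [hent w hw]
      simp only [pvFac, pvSgn, ← hyn, Nat.and_comm yn w]
      rw [if_neg hpar]
      push_cast
      ring

lemma pvT0Good : pvGoodT (List.replicate 8192 (1 : Int)) (fun _ => 1) := by
  constructor
  · exact List.length_replicate
  · intro w hw
    rw [List.getD_eq_getElem _ _ (by rw [List.length_replicate]; omega)]
    rw [List.getElem_replicate]
    norm_num

lemma pvIwhtLen1 (v : List Int) (h : v.length ≤ 1) : pvIwht v = v := by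
  rw [pvIwht]
  simp [h]

lemma pvIwhtStep (v : List Int) (h : ¬ v.length ≤ 1) :
    pvIwht v = ((PySem.List.pyRange 0 (PySem.Int.floordiv (v.length : Int) 2)).map (fun i =>
        PySem.Int.mod (PySem.List.pyGetD (pvIwht (PySem.List.slice v none (some (PySem.Int.floordiv (v.length : Int) 2)))) i 0
          + PySem.List.pyGetD (pvIwht (PySem.List.slice v (some (PySem.Int.floordiv (v.length : Int) 2)) none)) i 0) 1000000007) ++
      (PySem.List.pyRange 0 (PySem.Int.floordiv (v.length : Int) 2)).map (fun i =>
        PySem.Int.mod (PySem.List.pyGetD (pvIwht (PySem.List.slice v none (some (PySem.Int.floordiv (v.length : Int) 2)))) i 0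
          - PySem.List.pyGetD (pvIwht (PySem.List.slice v (some (PySem.Int.floordiv (v.length : Int) 2)) none)) i 0) 1000000007)) := by
  rw [pvIwht]
  simp only [h]
  rfl

lemma pvIwhtSpec : ∀ (n : Nat) (v : List Int), v.length = 2 ^ n →
    (pvIwht v).length = 2 ^ n ∧ ∀ j : Nat, j < 2 ^ n →
      (((pvIwht v).getD j 0 : Int) : ZMod 1000000007)
        = ∑ w ∈ Finset.range (2 ^ n), pvSgn j w * ((v.getD w 0 : Int) : ZMod 1000000007) := by
  intro n
  induction n with
  | zero =>
    intro v hv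
    rw [pvIwhtLen1 v (by omega)]
    refine ⟨hv, ?_⟩
    intro j hj
    have hj0 : j = 0 := by omega
    subst hj0
    rw [pow_zero, Finset.sum_range_one, pvSgn_zero_left, one_mul]
  | succ m ih =>
    intro v hv
    have hgt : ¬ v.length ≤ 1 := by
      rw [hv]
      have : 2 ^ (m + 1) ≥ 2 := by
        have : 2 ^ (m + 1) = 2 * 2 ^ m := by ring
        have h2 : 1 ≤ 2 ^ m := Nat.one_le_two_pow
        omega
      omega
    have hhalf : PySem.Int.floordiv (v.length : Int) 2 = ((2 ^ m : Nat) : Int) := by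
      have h1 : PySem.Int.floordiv ((v.length : Nat) : Int) ((2:Nat) : Int) = ((v.length / 2 : Nat) : Int) :=
        PySem.Int.floordiv_natCast v.length 2
      have h2 : v.length / 2 = 2 ^ m := by
        rw [hv, pow_succ]
        omega
      rw [← h2]
      exact_mod_cast h1
    rw [pvIwhtStep v hgt, hhalf]
    rw [PySem.List.slice_to_natCast, PySem.List.slice_from_natCast]
    have hlentake : (v.take (2 ^ m)).length = 2 ^ m := by
      rw [List.length_take, hv, pow_succ]
      omega
    have hlendrop : (v.drop (2 ^ m)).length = 2 ^ m := by
      rw [List.length_drop, hv, pow_succ]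
      omega
    obtain ⟨hlol, hlo⟩ := ih (v.take (2 ^ m)) hlentake
    obtain ⟨hhil, hhi⟩ := ih (v.drop (2 ^ m)) hlendrop
    set lo := pvIwht (v.take (2 ^ m))
    set hi := pvIwht (v.drop (2 ^ m))
    have hmaplen : ∀ g : Int → Int, ((PySem.List.pyRange 0 ((2 ^ m : Nat) : Int)).map g).length = 2 ^ m := by
      intro g
      rw [List.length_map, PySem.List.length_pyRange_one]
      omega
    have hsucc : (2:Nat) ^ (m + 1) = 2 ^ m + 2 ^ m := by rw [pow_succ]; omega
    constructor
    · rw [List.length_append, hmaplen, hmaplen, hsucc]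
    · intro j hj
      by_cases hjlow : j < 2 ^ m
      · have hentry : ((PySem.List.pyRange 0 ((2 ^ m : Nat) : Int)).map (fun i =>
              PySem.Int.mod (PySem.List.pyGetD lo i 0 + PySem.List.pyGetD hi i 0) 1000000007)
            ++ (PySem.List.pyRange 0 ((2 ^ m : Nat) : Int)).map (fun i =>
              PySem.Int.mod (PySem.List.pyGetD lo i 0 - PySem.List.pyGetD hi i 0) 1000000007)).getD j 0
            = PySem.Int.mod (PySem.List.pyGetD lo (j : Int) 0 + PySem.List.pyGetD hi (j : Int) 0) 1000000007 := by
          rw [List.getD_append _ _ _ _ (by rw [hmaplen]; omega)]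
          rw [← PySem.List.pyGetD_natCast]
          rw [PySem.List.pyGetD_map_pyRange_of_nonneg _ _ (j : Int) 0 (Int.natCast_nonneg j)
            (by exact_mod_cast hjlow)]
        rw [hentry, pvCastMod]
        push_cast
        rw [PySem.List.pyGetD_natCast, PySem.List.pyGetD_natCast]
        rw [hlo j hjlow, hhi j hjlow]
        rw [hsucc, pvSumRangeAdd]
        congr 1
        · apply Finset.sum_congr rfl
          intro w hw
          rw [pvTakeGetD v (2 ^ m) w (Finset.mem_range.mp hw) (by omega)]
        · apply Finset.sum_congr rfl
          intro w hw
          rw [pvDropGetD v (2 ^ m) w (by rw [hv, hsucc]; have := Finset.mem_range.mp hw; omega)]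
          rw [pvSgn_low_high m j w hjlow (Finset.mem_range.mp hw)]
      · obtain ⟨j', rfl⟩ : ∃ j', j = 2 ^ m + j' := ⟨j - 2 ^ m, by omega⟩
        have hj' : j' < 2 ^ m := by
          rw [hsucc] at hj
          omega
        have hentry : ((PySem.List.pyRange 0 ((2 ^ m : Nat) : Int)).map (fun i =>
              PySem.Int.mod (PySem.List.pyGetD lo i 0 + PySem.List.pyGetD hi i 0) 1000000007)
            ++ (PySem.List.pyRange 0 ((2 ^ m : Nat) : Int)).map (fun i =>
              PySem.Int.mod (PySem.List.pyGetD lo i 0 - PySem.List.pyGetD hi i 0) 1000000007)).getD (2 ^ m + j') 0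
            = PySem.Int.mod (PySem.List.pyGetD lo (j' : Int) 0 - PySem.List.pyGetD hi (j' : Int) 0) 1000000007 := by
          rw [List.getD_append_right _ _ _ _ (by rw [hmaplen]; omega)]
          rw [hmaplen]
          have : 2 ^ m + j' - 2 ^ m = j' := by omega
          rw [this]
          rw [← PySem.List.pyGetD_natCast]
          rw [PySem.List.pyGetD_map_pyRange_of_nonneg _ _ (j' : Int) 0 (Int.natCast_nonneg j')
            (by exact_mod_cast hj')]
        rw [hentry, pvCastMod]
        push_cast
        rw [PySem.List.pyGetD_natCast, PySem.List.pyGetD_natCast]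
        rw [hlo j' hj', hhi j' hj']
        rw [hsucc, pvSumRangeAdd]
        have h1 : ∀ w ∈ Finset.range (2 ^ m), pvSgn (2 ^ m + j') w * ((v.getD w 0 : Int) : ZMod 1000000007)
            = pvSgn j' w * (((v.take (2 ^ m)).getD w 0 : Int) : ZMod 1000000007) := by
          intro w hw
          rw [pvSgn_high_low m j' w hj' (Finset.mem_range.mp hw)]
          rw [pvTakeGetD v (2 ^ m) w (Finset.mem_range.mp hw) (by omega)]
        have h2 : ∀ w ∈ Finset.range (2 ^ m), pvSgn (2 ^ m + j') (2 ^ m + w) * ((v.getD (2 ^ m + w) 0 : Int) : ZMod 1000000007)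
            = - (pvSgn j' w * (((v.drop (2 ^ m)).getD w 0 : Int) : ZMod 1000000007)) := by
          intro w hw
          rw [pvSgn_high_high m j' w hj' (Finset.mem_range.mp hw)]
          rw [pvDropGetD v (2 ^ m) w (by rw [hv, hsucc]; have := Finset.mem_range.mp hw; omega)]
          ring
        rw [Finset.sum_congr rfl h1, Finset.sum_congr rfl h2]
        rw [Finset.sum_neg_distrib]
        ring

lemma pvFoldAGood (items : List (Int × Int)) (hb : ∀ p ∈ items, -8192 ≤ p.1 ∧ p.1 < 8192) :
    ∀ (v : List Int) (f : Nat → ZMod 1000000007), pvGoodA v f →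
    pvGoodA (items.foldl (fun row p => pvRowA row p.1 p.2) v)
      (items.foldl (fun f p => pvStepZ p.1 p.2 f) f) := by
  induction items with
  | nil => intro v f h; exact h
  | cons p ps ih =>
    intro v f h
    simp only [List.foldl_cons]
    exact ih (fun q hq => hb q (by simp [hq])) _ _
      (pvStepAGood v f p.1 p.2 h (hb p (by simp)).1 (hb p (by simp)).2)

lemma pvFoldTGood (items : List (Int × Int)) :
    ∀ (t : List Int) (g : Nat → ZMod 1000000007), pvGoodT t g →
    pvGoodT (items.foldl (fun t p => pvStepT t p.1 p.2) t)
      (fun w => items.foldl (fun acc p => acc * pvFac p.1 p.2 w) (g w)) := by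
  induction items with
  | nil => intro t g h; exact h
  | cons p ps ih =>
    intro t g h
    simp only [List.foldl_cons]
    exact ih _ _ (pvStepTGood t g p.1 p.2 h)

-- ===== VERDICT (by name: the statement is the Claim_ definition above) =====
theorem primeXor_spec : Claim_equal_primeXor := by
  unfold Claim_equal_primeXor
  intro a _hdom hpre
  unfold Spec_primeXor
  simp only [primeXor, primeXor_alt]
  rw [← PySem.Dict.counter_eq_foldl]
  set items := (PySem.Dict.counter a).items with hitems
  have hlast := pvLastFold items [] (PySem.List.pySetD (List.replicate 8192 (0:Int)) 0 1)
  simp only [List.nil_append] at hlast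
  rw [hlast]
  have hb : ∀ p ∈ items, -8192 ≤ p.1 ∧ p.1 < 8192 := by
    intro p hp
    rw [hitems, PySem.Dict.items_counter] at hp
    obtain ⟨k, hk, rfl⟩ := List.mem_map.mp hp
    exact hpre k ((PySem.Set.mem_ofList _ _).mp hk)
  have hGA := pvFoldAGood items hb _ _ pvRow0Good
  set rowF := items.foldl (fun row p => pvRowA row p.1 p.2)
    (PySem.List.pySetD (List.replicate 8192 (0:Int)) 0 1) with hrowF
  obtain ⟨hrlen, hrent⟩ := hGA
  have hGT := pvFoldTGood items _ _ pvT0Good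
  set t := items.foldl (fun t p => pvStepT t p.1 p.2) (List.replicate 8192 (1:Int)) with ht
  obtain ⟨htlen, htent⟩ := hGT
  have h213 : (2:Nat) ^ 13 = 8192 := by norm_num
  have htlen' : t.length = 2 ^ 13 := by rw [htlen, h213]
  obtain ⟨hiwl, hiw⟩ := pvIwhtSpec 13 t htlen'
  set vec := (pvIwht t).map (fun v => PySem.Int.mod (v * 883911139) 1000000007) with hvec
  have hb13 : ∀ p ∈ items, (PySem.Int.mod p.1 8192).toNat < 2 ^ 13 := by
    intro p _
    have := pvModToNatLt p.1
    omega
  have hinv : ((2 ^ 13 : Nat) : ZMod 1000000007) * (883911139 : ZMod 1000000007) = 1 := by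
    have hc : ((2 ^ 13 : Nat) : ZMod 1000000007) = (8192 : ZMod 1000000007) := by norm_num
    rw [hc]
    decide
  have hveq : ∀ j : Nat, j < 8192 →
      ((vec.getD j 0 : Int) : ZMod 1000000007) = pvVF items j
        ∧ 0 ≤ vec.getD j 0 ∧ vec.getD j 0 < 1000000007 := by
    intro j hj
    have hj13 : j < 2 ^ 13 := by omega
    have hventry : vec.getD j 0 = PySem.Int.mod ((pvIwht t).getD j 0 * 883911139) 1000000007 := by
      rw [hvec, List.getD_eq_getElem _ _ (by rw [List.length_map, hiwl]; exact hj13),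
        List.getElem_map, List.getD_eq_getElem _ _ (by rw [hiwl]; exact hj13)]
    refine ⟨?_, by rw [hventry]; exact PySem.Int.mod_nonneg _ (by norm_num),
      by rw [hventry]; exact PySem.Int.mod_lt _ (by norm_num)⟩
    rw [hventry, pvCastMod]
    push_cast
    rw [hiw j hj13]
    have hsum : (∑ w ∈ Finset.range (2 ^ 13), pvSgn j w * ((t.getD w 0 : Int) : ZMod 1000000007))
        = ∑ w ∈ Finset.range (2 ^ 13), pvSgn j w
            * (items.foldl (fun acc p => acc * pvFac p.1 p.2 w) 1) := by
      apply Finset.sum_congr rfl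
      intro w hw
      have hw8 : w < 8192 := by have := Finset.mem_range.mp hw; omega
      rw [htent w hw8]
    rw [hsum, pvDouble 13 items hb13 j hj13]
    rw [show ((2 ^ 13 : Nat) : ZMod 1000000007) * pvVF items j * (883911139 : ZMod 1000000007)
        = (((2 ^ 13 : Nat) : ZMod 1000000007) * (883911139 : ZMod 1000000007)) * pvVF items j
      from by ring]
    rw [hinv, one_mul]
  have hentEq : ∀ j : Nat, j < 8192 → rowF.getD j 0 = vec.getD j 0 := by
    intro j hj
    exact pvIntEq _ _ (hrent j hj).1 (hrent j hj).2.1 (hveq j hj).2.1 (hveq j hj).2.2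
      (by rw [(hrent j hj).2.2, (hveq j hj).1]; rfl)
  rw [PySem.List.foldl_if_eq_foldl_filter pvIsPrimeA]
  rw [PySem.List.foldl_add]
  rw [List.filter_congr (fun x _ => pvPrimeAgree x)]
  rw [zero_add]
  have hmap : ((PySem.List.pyRange 2 8192).filter (fun j => pvIsPrimeB j)).map
        (fun x => PySem.List.pyGetD rowF x 0)
      = ((PySem.List.pyRange 2 8192).filter (fun j => pvIsPrimeB j)).map
        (fun j => PySem.List.pyGetD vec j 0) := by
    apply List.map_congr_left
    intro x hx
    have hmem := (List.mem_filter.mp hx).1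
    obtain ⟨hx1, hx2⟩ := PySem.List.mem_pyRange_one.mp hmem
    have hxn : x = ((x.toNat : Nat) : Int) := by omega
    rw [hxn, PySem.List.pyGetD_natCast, PySem.List.pyGetD_natCast]
    exact hentEq x.toNat (by omega)
  rw [hmap]
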